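-- pv_equiv track=rewrite | github.com/OmriKad/Into-To-CS-BGU | python 1st semester HW backup/hw4b/hw4b/hw4b.py | abc_words_help
-- ===== SOURCE A (Python) =====
-- def abc_words_help(num, final, tmp):
--     if num == 0:
--         final.append(tmp[:])
--     if num < 0:
--         return
--     abc_words_help(num - 1, final, tmp + 'a')
--     abc_words_help(num - 1, final, tmp + 'b')
--     abc_words_help(num - 1, final, tmp + 'c')
--     return final
-- ===== SOURCE B (Python) =====
-- def abc_words_help(num, final, tmp):
--     if num < 0:
--         return
--     combos = ['']
--     for _ in range(num):
--         combos = [s + ch for s in combos for ch in 'abc']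
--     for c in combos:
--         final.append(tmp + c)
--     return final
-- ===== Notes on version B (the rewrite author's own statement) =====
-- stated objective: alternative
-- what changed: Replaces A's ternary DFS recursion (which branches three ways and descends depth-first) by a single iterative breadth-wise product: combos starts at [''] and is expanded num times by appending each of 'a','b','c', then all completed words are appended to final in one pass.
-- outside the precondition, e.g. on abc_words_help(-1, [], ''): A returns None, B returns None
import Mathlib
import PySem

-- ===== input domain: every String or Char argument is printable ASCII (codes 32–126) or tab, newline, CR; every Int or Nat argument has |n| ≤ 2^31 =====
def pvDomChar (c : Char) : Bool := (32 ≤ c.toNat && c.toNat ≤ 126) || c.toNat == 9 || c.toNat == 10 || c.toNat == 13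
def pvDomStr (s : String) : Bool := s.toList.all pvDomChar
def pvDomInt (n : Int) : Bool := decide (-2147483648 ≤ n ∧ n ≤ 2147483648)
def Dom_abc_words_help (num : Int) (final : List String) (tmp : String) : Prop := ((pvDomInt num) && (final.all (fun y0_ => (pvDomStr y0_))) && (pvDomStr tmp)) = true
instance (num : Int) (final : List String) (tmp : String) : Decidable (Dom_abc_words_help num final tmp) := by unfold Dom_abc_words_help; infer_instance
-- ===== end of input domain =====

-- B replaces A's ternary DFS recursion by an iterative breadth-wise product expansion (alternative
-- decomposition, same cost). Both Pythons mutate `final` in place; the equivalence proved here is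
-- about the return value.

-- ===== PORT A =====
-- Literal port of A. Where Python A returns None (num < 0, excluded by Pre_) the port returns
-- `final` unchanged, which also models that the recursive calls at num = 0 have no effect.
def abc_words_help (num : Int) (final : List String) (tmp : String) : List String :=
  let final := if num = 0 then final ++ [tmp] else final
  if num < 0 then final
  else
    let final := abc_words_help (num - 1) final (tmp ++ "a")
    let final := abc_words_help (num - 1) final (tmp ++ "b")
    let final := abc_words_help (num - 1) final (tmp ++ "c")
    final
termination_by (num + 1).toNat
decreasing_by all_goals (simp at *; omega)

-- ===== PORT B =====
-- B's inner comprehension [s + ch for s in combos for ch in 'abc']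
def bExpand (combos : List String) : List String :=
  combos.flatMap (fun s => "abc".toList.map (fun ch => s ++ ch.toString))

def abc_words_help_alt (num : Int) (final : List String) (tmp : String) : List String :=
  if num < 0 then final
  else
    let combos := (List.range num.toNat).foldl (fun acc _ => bExpand acc) [""]
    combos.foldl (fun acc c => acc ++ [tmp ++ c]) final

-- ===== PRECONDITION & SPEC =====
-- Pre_ excludes num < 0, where Python A (and B) return None instead of a list, and num > 900,
-- where CPython raises RecursionError (A's recursion depth is num and the default limit is 1000).
def Pre_abc_words_help (num : Int) (final : List String) (tmp : String) : Prop := 0 ≤ num ∧ num ≤ 900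
instance (num : Int) (final : List String) (tmp : String) : Decidable (Pre_abc_words_help num final tmp) := by unfold Pre_abc_words_help; infer_instance
def pvWitness_abc_words_help : Int × List String × String := (2, ["q"], "x")

def Spec_abc_words_help (num : Int) (final : List String) (tmp : String) (out : List String) : Prop := out = abc_words_help_alt num final tmp
instance (num : Int) (final : List String) (tmp : String) (out : List String) : Decidable (Spec_abc_words_help num final tmp out) := by unfold Spec_abc_words_help; infer_instance

-- ===== CLAIM (what is proved, stated in full; the proofs are below) =====
def Claim_equal_abc_words_help : Prop := ∀ (num : Int) (final : List String) (tmp : String), Dom_abc_words_help num final tmp → Pre_abc_words_help num final tmp → Spec_abc_words_help num final tmp (abc_words_help num final tmp)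

-- ===== LEMMAS AND PROOFS =====

-- Prefix-wise characterisation of the word list, matching A's recursion order.
def pfxWords : Nat → List String
  | 0 => [""]
  | n + 1 =>
      (pfxWords n).map (fun s => "a" ++ s) ++ (pfxWords n).map (fun s => "b" ++ s)
        ++ (pfxWords n).map (fun s => "c" ++ s)

theorem push_append (p a : String) (c : Char) : (p ++ a).push c = p ++ a.push c := by
  simp only [String.push_eq_append, String.append_assoc]

theorem bExpand_map (p : String) (l : List String) :
    bExpand (l.map (fun s => p ++ s)) = (bExpand l).map (fun s => p ++ s) := by
  simp [bExpand, List.flatMap_map, List.map_flatMap, push_append]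

theorem bExpand_append (l₁ l₂ : List String) :
    bExpand (l₁ ++ l₂) = bExpand l₁ ++ bExpand l₂ := by
  simp [bExpand]

theorem bExpand_pfx (n : Nat) : bExpand (pfxWords n) = pfxWords (n + 1) := by
  induction n with
  | zero => rfl
  | succ n ih =>
      rw [pfxWords, bExpand_append, bExpand_append, bExpand_map, bExpand_map, bExpand_map, ih]
      rfl

theorem foldl_range_pfx (n : Nat) :
    (List.range n).foldl (fun acc _ => bExpand acc) [""] = pfxWords n := by
  induction n with
  | zero => rfl
  | succ n ih =>
      rw [List.range_succ, List.foldl_append, ih]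
      simp only [List.foldl_cons, List.foldl_nil]
      exact bExpand_pfx n

theorem abc_words_help_char (n : Nat) :
    ∀ (final : List String) (tmp : String),
      abc_words_help (n : Int) final tmp = final ++ (pfxWords n).map (fun s => tmp ++ s) := by
  induction n with
  | zero =>
      intro final tmp
      rw [abc_words_help]
      simp [abc_words_help, pfxWords]
  | succ n ih =>
      intro final tmp
      have e : ((n + 1 : Nat) : Int) = (n : Int) + 1 := by push_cast; ring
      rw [abc_words_help, e]
      rw [if_neg (by omega : ¬ ((n : Int) + 1 = 0)), if_neg (by omega : ¬ ((n : Int) + 1 < 0))]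
      have e1 : (n : Int) + 1 - 1 = (n : Int) := by ring
      rw [e1]
      simp only [ih]
      rw [pfxWords]
      simp [String.append_assoc, Function.comp_def]

-- ===== VERDICT (by name: the statement is the Claim_ definition above) =====
theorem abc_words_help_spec : Claim_equal_abc_words_help := by
  intro num final tmp _ hpre
  unfold Spec_abc_words_help abc_words_help_alt
  obtain ⟨n, rfl⟩ := Int.eq_ofNat_of_zero_le hpre.1
  rw [abc_words_help_char]
  rw [if_neg (by omega : ¬ ((n : Int) < 0))]
  simp only [Int.toNat_natCast, foldl_range_pfx, PySem.List.foldl_append_singleton_eq_map]
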